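-- pv_equiv track=rewrite | github.com/Harsh011000/Project-KCLERY | Ai_NLP.py | filter_google
-- ===== SOURCE A (Python) =====
-- def filter_google(text):
--     text = text.strip()
--     googlearr = text.split(" ")
--     if (googlearr[0] == "search"):
--         googlearr.pop(0)
--     elif (googlearr[len(googlearr) - 1] == "search"):
--         googlearr.pop(len(googlearr) - 1)
--     elif (googlearr[0] == "research"):
--         googlearr.pop(0)
--     elif (googlearr[len(googlearr) - 1] == "research"):
--         googlearr.pop(len(googlearr) - 1)
--     elif (googlearr[0] == "find"):
--         googlearr.pop(0)
--     elif (googlearr[len(googlearr) - 1] == "find"):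
--         googlearr.pop(len(googlearr) - 1)
--     else:
--         return text
--     searchString = ""
--     for i in googlearr:
--         searchString += i + " "
--     return searchString
-- ===== SOURCE B (Python) =====
-- def filter_google(text):
--     # Pure string surgery: no split/join; remove the keyword prefix/suffix directly
--     # and append the single trailing space the original's word-rejoin produces.
--     t = text.strip()
--     for kw in ("search", "research", "find"):
--         if t == kw:
--             return ""
--         if t.startswith(kw + " "):
--             return t[len(kw) + 1:] + " "
--         if t.endswith(" " + kw):
--             return t[:-(len(kw) + 1)] + " "
--     return t
-- ===== Notes on version B (the rewrite author's own statement) =====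
-- stated objective: simpler
-- what changed: B never builds a word list: instead of A's split-into-words / positional pop / rejoin-with-trailing-spaces pipeline, B works directly on the stripped string, removing a matched keyword by prefix/suffix slicing (whole string equals the keyword, or it starts with keyword-plus-space, or ends with space-plus-keyword) and appending the single trailing space A's rejoin produces.
import Mathlib
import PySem

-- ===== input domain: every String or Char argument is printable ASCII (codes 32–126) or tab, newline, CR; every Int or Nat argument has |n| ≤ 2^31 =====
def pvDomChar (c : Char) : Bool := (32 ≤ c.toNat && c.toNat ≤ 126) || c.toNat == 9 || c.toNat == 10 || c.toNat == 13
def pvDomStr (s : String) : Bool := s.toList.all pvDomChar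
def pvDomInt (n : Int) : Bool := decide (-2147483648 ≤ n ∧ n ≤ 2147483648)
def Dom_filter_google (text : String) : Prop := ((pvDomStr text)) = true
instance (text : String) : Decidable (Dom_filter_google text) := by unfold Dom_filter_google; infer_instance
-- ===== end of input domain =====

-- B replaces A's split-words / pop / rejoin pipeline by direct string surgery: it never
-- builds a word list, it removes a matched keyword prefix/suffix of the stripped text by
-- slicing and appends the one trailing space A's rejoin produces. Objective: simpler.


-- ===== PORT A =====
-- searchString = ""; for i in googlearr: searchString += i + " "   (words as char lists)
def pvJoinLoopC (l : List (List Char)) : List Char :=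
  l.foldl (fun s i => s ++ i ++ [' ']) []

-- googlearr.pop(i) used for its rest (the popped element is discarded); the index is
-- always in range where A uses it, so the unreachable `none` falls back to the list itself
def pvPopAtC (l : List (List Char)) (i : Int) : List (List Char) :=
  ((PySem.List.pop? l i).map Prod.snd).getD l

def filter_google (text : String) : String :=
  let t := PySem.Chars.strip text.toList
  -- text.split(" "): sep ≠ "" so split? never returns none
  let arr := (PySem.Chars.split? t [' ']).getD []
  let lastIdx : Int := (arr.length : Int) - 1
  String.ofList
    (if PySem.List.pyGet? arr 0 = some ['s','e','a','r','c','h'] then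
       pvJoinLoopC (pvPopAtC arr 0)
     else if PySem.List.pyGet? arr lastIdx = some ['s','e','a','r','c','h'] then
       pvJoinLoopC (pvPopAtC arr lastIdx)
     else if PySem.List.pyGet? arr 0 = some ['r','e','s','e','a','r','c','h'] then
       pvJoinLoopC (pvPopAtC arr 0)
     else if PySem.List.pyGet? arr lastIdx = some ['r','e','s','e','a','r','c','h'] then
       pvJoinLoopC (pvPopAtC arr lastIdx)
     else if PySem.List.pyGet? arr 0 = some ['f','i','n','d'] then
       pvJoinLoopC (pvPopAtC arr 0)
     else if PySem.List.pyGet? arr lastIdx = some ['f','i','n','d'] then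
       pvJoinLoopC (pvPopAtC arr lastIdx)
     else t)

-- ===== PORT B =====
-- the for-loop of Source B: per keyword, t == kw → "" ; t.startswith(kw+" ") → t[len(kw)+1:]+" " ;
-- t.endswith(" "+kw) → t[:-(len(kw)+1)]+" " ; loop exhausted → t
def pvScanC (t : List Char) : List (List Char) → List Char
  | [] => t
  | kw :: rest =>
    if t = kw then []
    else if PySem.Chars.startswith t (kw ++ [' ']) then
      PySem.Chars.slice t (some ((kw.length : Int) + 1)) none ++ [' ']
    else if PySem.Chars.endswith t ([' '] ++ kw) then
      PySem.Chars.slice t none (some (-((kw.length : Int) + 1))) ++ [' ']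
    else pvScanC t rest

def filter_google_alt (text : String) : String :=
  String.ofList (pvScanC (PySem.Chars.strip text.toList)
    [['s','e','a','r','c','h'], ['r','e','s','e','a','r','c','h'], ['f','i','n','d']])

-- ===== PRECONDITION & SPEC =====
def Spec_filter_google (text : String) (out : String) : Prop := out = filter_google_alt text
instance (text : String) (out : String) : Decidable (Spec_filter_google text out) := by unfold Spec_filter_google; infer_instance

-- ===== CLAIM (what is proved, stated in full; the proofs are below) =====
def Claim_equal_filter_google : Prop := ∀ (text : String), Dom_filter_google text → Spec_filter_google text (filter_google text)

-- ===== LEMMAS AND PROOFS =====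

-- a simple structural model of t.split(" ") : the first word and the remaining words
def pvMSplit : List Char → List Char × List (List Char)
  | [] => ([], [])
  | c :: r =>
    let m := pvMSplit r
    if c = ' ' then ([], m.1 :: m.2) else (c :: m.1, m.2)

def pvMSArr (t : List Char) : List (List Char) := (pvMSplit t).1 :: (pvMSplit t).2

theorem pv_splitOn_go (l : List Char) : ∀ (fuel : Nat) (cur : List Char)
    (acc : List (List Char)), l.length < fuel →
    PySem.Chars.splitOn.go [' '] fuel l cur acc
      = acc.reverse ++ (cur.reverse ++ (pvMSplit l).1) :: (pvMSplit l).2 := by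
  induction l with
  | nil =>
    intro fuel cur acc h
    obtain ⟨n, rfl⟩ := Nat.exists_eq_succ_of_ne_zero (by omega : fuel ≠ 0)
    simp [PySem.Chars.splitOn.go, pvMSplit]
  | cons c rest ih =>
    intro fuel cur acc h
    obtain ⟨n, rfl⟩ := Nat.exists_eq_succ_of_ne_zero (by omega : fuel ≠ 0)
    rw [PySem.Chars.splitOn.go]
    by_cases hc : c = ' '
    · subst hc
      rw [if_pos (by simp [List.isPrefixOf])]
      simp only [List.length_singleton, List.drop_one, List.tail_cons]
      rw [ih n [] (cur.reverse :: acc) (by simp at h; omega)]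
      simp [pvMSplit]
    · rw [if_neg (by simp [List.isPrefixOf]; intro h'; exact hc h'.symm)]
      rw [ih n (c :: cur) acc (by simp at h; omega)]
      simp [pvMSplit, hc]

theorem pv_split_eq (t : List Char) :
    (PySem.Chars.split? t [' ']).getD [] = pvMSArr t := by
  simp [PySem.Chars.split?, PySem.Chars.splitOn,
    pv_splitOn_go t (t.length + 1) [] [] (by omega), pvMSArr]

theorem pv_msplit_nospace (t : List Char) (h : ' ' ∉ t) : pvMSplit t = (t, []) := by
  induction t with
  | nil => rfl
  | cons c r ih =>
    simp only [List.mem_cons, not_or] at h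
    have hc : ¬ c = ' ' := fun he => h.1 he.symm
    simp [pvMSplit, ih h.2, hc]

theorem pv_msplit_append (a b : List Char) :
    pvMSplit (a ++ ' ' :: b) = ((pvMSplit a).1, (pvMSplit a).2 ++ pvMSArr b) := by
  induction a with
  | nil => simp [pvMSplit, pvMSArr]
  | cons c a' ih =>
    by_cases hc : c = ' ' <;> simp [pvMSplit, hc, ih]

theorem pv_msarr_append (a b : List Char) :
    pvMSArr (a ++ ' ' :: b) = pvMSArr a ++ pvMSArr b := by
  simp [pvMSArr, pv_msplit_append]

theorem pv_joinLoop_eq_flatten (l : List (List Char)) :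
    pvJoinLoopC l = (l.map (· ++ [' '])).flatten := by
  simp [pvJoinLoopC]

theorem pv_joinLoop_msarr (r : List Char) : pvJoinLoopC (pvMSArr r) = r ++ [' '] := by
  rw [pv_joinLoop_eq_flatten]
  induction r with
  | nil => simp [pvMSArr, pvMSplit]
  | cons c r' ih =>
    by_cases hc : c = ' '
    · simp_all [pvMSArr, pvMSplit]
    · simp_all [pvMSArr, pvMSplit]

theorem pv_first_space (t : List Char) (h : ' ' ∈ t) :
    ∃ p q, t = p ++ ' ' :: q ∧ ' ' ∉ p := by
  induction t with
  | nil => cases h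
  | cons c r ih =>
    by_cases hc : c = ' '
    · exact ⟨[], r, by simp [hc], by simp⟩
    · have hr : ' ' ∈ r := by
        rcases List.mem_cons.mp h with h' | h'
        · exact absurd h'.symm hc
        · exact h'
      obtain ⟨p, q, heq, hp⟩ := ih hr
      refine ⟨c :: p, q, by simp [heq], ?_⟩
      simp only [List.mem_cons, not_or]
      exact ⟨fun he => hc he.symm, hp⟩

theorem pv_last_space (t : List Char) (h : ' ' ∈ t) :
    ∃ q p, t = q ++ ' ' :: p ∧ ' ' ∉ p := by
  obtain ⟨p, q, heq, hp⟩ := pv_first_space t.reverse (by simpa using h)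
  refine ⟨q.reverse, p.reverse, ?_, by simpa using hp⟩
  have h2 := congrArg List.reverse heq
  simpa using h2

theorem pv_first_space_unique (p kw q q' : List Char) (hp : ' ' ∉ p) (hkw : ' ' ∉ kw)
    (h : p ++ ' ' :: q = kw ++ ' ' :: q') : p = kw ∧ q = q' := by
  revert hp hkw h
  induction p generalizing kw q q' with
  | nil =>
    intro hp hkw h
    cases kw with
    | nil => simpa using h
    | cons c kw' =>
      simp only [List.nil_append, List.cons_append, List.cons.injEq] at h
      exact absurd (h.1 ▸ List.mem_cons_self) hkw
  | cons c p' ih =>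
    intro hp hkw h
    cases kw with
    | nil =>
      simp only [List.cons_append, List.nil_append, List.cons.injEq] at h
      exact absurd (h.1.symm ▸ List.mem_cons_self) hp
    | cons d kw' =>
      simp only [List.cons_append, List.cons.injEq] at h
      have hp' : ' ' ∉ p' := fun hm => hp (List.mem_cons_of_mem _ hm)
      have hkw' : ' ' ∉ kw' := fun hm => hkw (List.mem_cons_of_mem _ hm)
      obtain ⟨h1, h2⟩ := ih kw' q q' hp' hkw' h.2
      exact ⟨by rw [h.1, h1], h2⟩

theorem pv_pyGet?_zero {α : Type} (a : α) (r : List α) :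
    PySem.List.pyGet? (a :: r) 0 = some a := by
  simp [PySem.List.pyGet?, PySem.List.pyIdx?]

theorem pv_pyGet?_pred {α : Type} (xs : List α) (h : xs ≠ []) :
    PySem.List.pyGet? xs ((xs.length : Int) - 1) = some (xs.getLast h) := by
  have hl : 0 < xs.length := List.length_pos_iff.mpr h
  unfold PySem.List.pyGet? PySem.List.pyIdx?
  rw [if_pos (by omega), if_pos (by omega)]
  simp [List.getLast_eq_getElem]

theorem pv_popAt_zero (a : List Char) (r : List (List Char)) : pvPopAtC (a :: r) 0 = r := by
  simp [pvPopAtC, PySem.List.pop?_zero_cons]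

theorem pv_popAt_pred (xs : List (List Char)) (h : xs ≠ []) :
    pvPopAtC xs ((xs.length : Int) - 1) = xs.dropLast := by
  have hl : 0 < xs.length := List.length_pos_iff.mpr h
  have e : ((xs.length : Int) - 1) = ((xs.length - 1 : Nat) : Int) := by omega
  rw [pvPopAtC, e, PySem.List.pop?_natCast xs (xs.length - 1) (by omega)]
  simp [List.eraseIdx_length_sub_one]

-- one keyword step: A's front-then-back pop on the word array equals B's string surgery
theorem pv_step (kw : List Char) (hkw : ' ' ∉ kw) (t K : List Char) :
    (if PySem.List.pyGet? (pvMSArr t) 0 = some kw then pvJoinLoopC (pvPopAtC (pvMSArr t) 0)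
     else if PySem.List.pyGet? (pvMSArr t) (((pvMSArr t).length : Int) - 1) = some kw then
       pvJoinLoopC (pvPopAtC (pvMSArr t) (((pvMSArr t).length : Int) - 1))
     else K)
    = (if t = kw then []
       else if PySem.Chars.startswith t (kw ++ [' ']) then
         PySem.Chars.slice t (some ((kw.length : Int) + 1)) none ++ [' ']
       else if PySem.Chars.endswith t ([' '] ++ kw) then
         PySem.Chars.slice t none (some (-((kw.length : Int) + 1))) ++ [' ']
       else K) := by
  by_cases hsp : ' ' ∈ t
  · -- t contains a space: t ≠ kw, the array is p :: pvMSArr q = pvMSArr q' ++ [p']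
    have htkw : t ≠ kw := fun he => hkw (he ▸ hsp)
    obtain ⟨p, q, hteq, hp⟩ := pv_first_space t hsp
    obtain ⟨q', p', hteq', hp'⟩ := pv_last_space t hsp
    have harr : pvMSArr t = p :: pvMSArr q := by
      rw [hteq, pv_msarr_append]
      simp [pvMSArr, pv_msplit_nospace p hp]
    have harr' : pvMSArr t = pvMSArr q' ++ [p'] := by
      rw [hteq', pv_msarr_append]
      simp [pvMSArr, pv_msplit_nospace p' hp']
    have hne : pvMSArr t ≠ [] := by simp [pvMSArr]
    -- front condition
    have hfront : (PySem.List.pyGet? (pvMSArr t) 0 = some kw)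
        ↔ (PySem.Chars.startswith t (kw ++ [' ']) = true) := by
      rw [harr, pv_pyGet?_zero, PySem.Chars.startswith_iff]
      constructor
      · rintro h
        simp only [Option.some.injEq] at h
        exact ⟨q, by rw [hteq, h]; simp⟩
      · rintro ⟨r, hr⟩
        have : p ++ ' ' :: q = kw ++ ' ' :: r := by
          rw [← hteq]; rw [← hr]; simp
        exact congrArg some (pv_first_space_unique p kw q r hp hkw this).1
    -- back condition
    have hback_get : PySem.List.pyGet? (pvMSArr t) (((pvMSArr t).length : Int) - 1) = some p' := by
      rw [harr', pv_pyGet?_pred _ (by simp)]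
      simp
    have hback : (PySem.List.pyGet? (pvMSArr t) (((pvMSArr t).length : Int) - 1) = some kw)
        ↔ (PySem.Chars.endswith t ([' '] ++ kw) = true) := by
      rw [hback_get, PySem.Chars.endswith_iff]
      constructor
      · rintro h
        simp only [Option.some.injEq] at h
        exact ⟨q', by rw [hteq', h]; simp⟩
      · rintro ⟨r, hr⟩
        have h2 : q' ++ ' ' :: p' = r ++ ' ' :: kw := by
          rw [← hteq', ← hr]; simp
        have h3 := congrArg List.reverse h2
        simp only [List.reverse_append, List.reverse_cons] at h3
        have h4 : p'.reverse ++ ' ' :: q'.reverse = kw.reverse ++ ' ' :: r.reverse := by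
          simpa using h3
        have h5 := pv_first_space_unique p'.reverse kw.reverse q'.reverse r.reverse
          (by simpa using hp') (by simpa using hkw) h4
        have : p' = kw := by
          have := congrArg List.reverse h5.1
          simpa using this
        exact congrArg some this
    rw [if_neg htkw]
    by_cases hf : PySem.Chars.startswith t (kw ++ [' ']) = true
    · -- front match: p = kw, A pops the head
      rw [if_pos (hfront.mpr hf), if_pos hf]
      have hpk : p = kw := by
        have := hfront.mpr hf
        rw [harr, pv_pyGet?_zero] at this
        simpa using this
      rw [harr, pv_popAt_zero, pv_joinLoop_msarr]
      have hslice : PySem.Chars.slice t (some ((kw.length : Int) + 1)) none = q := by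
        have e : ((kw.length : Int) + 1) = (((kw.length + 1 : Nat)) : Int) := by push_cast; ring
        rw [PySem.Chars.slice_eq_listSlice, e, PySem.List.slice_from_natCast]
        rw [hteq, hpk]
        rw [show kw ++ ' ' :: q = (kw ++ [' ']) ++ q by simp]
        rw [show kw.length + 1 = (kw ++ [' ']).length by simp]
        exact List.drop_left
      rw [hslice]
    · -- no front match
      rw [if_neg (fun h => hf (hfront.mp h)), if_neg hf]
      by_cases hb : PySem.Chars.endswith t ([' '] ++ kw) = true
      · rw [if_pos (hback.mpr hb), if_pos hb]
        have hp'k : p' = kw := by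
          have h1 := hback.mpr hb
          rw [hback_get] at h1
          simpa using h1
        rw [pv_popAt_pred _ hne, harr',
          show (pvMSArr q' ++ [p']).dropLast = pvMSArr q' by simp, pv_joinLoop_msarr]
        have hslice : PySem.Chars.slice t none (some (-((kw.length : Int) + 1))) = q' := by
          have e : ((kw.length : Int) + 1) = (((kw.length + 1 : Nat)) : Int) := by push_cast; ring
          rw [PySem.Chars.slice_eq_listSlice, e,
            PySem.List.slice_to_neg_natCast _ _ (by omega)]
          rw [hteq', hp'k]
          have hlen : (q' ++ ' ' :: kw).length - (kw.length + 1) = q'.length := by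
            simp
          rw [hlen, show q' ++ ' ' :: kw = q' ++ (' ' :: kw) from rfl]
          exact List.take_left
        rw [hslice]
      · rw [if_neg (fun h => hb (hback.mp h)), if_neg hb]
  · -- t has no space: the array is [t]; only the t = kw branches can fire
    have harr : pvMSArr t = [t] := by simp [pvMSArr, pv_msplit_nospace t hsp]
    have hf : ¬ (PySem.Chars.startswith t (kw ++ [' ']) = true) := by
      rw [PySem.Chars.startswith_iff]
      rintro ⟨r, hr⟩
      exact hsp (hr ▸ (by simp : ' ' ∈ (kw ++ [' ']) ++ r))
    have hb : ¬ (PySem.Chars.endswith t ([' '] ++ kw) = true) := by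
      rw [PySem.Chars.endswith_iff]
      rintro ⟨r, hr⟩
      exact hsp (hr ▸ (by simp : ' ' ∈ r ++ ([' '] ++ kw)))
    rw [harr]
    simp only [List.length_singleton, Nat.cast_one, sub_self, pv_pyGet?_zero]
    by_cases hk : t = kw
    · subst hk
      simp [pv_popAt_zero, pvJoinLoopC]
    · simp [hk, hf]
      intro h
      exact absurd h (by simpa using hb)

-- ===== VERDICT (by name: the statement is the Claim_ definition above) =====
theorem filter_google_spec : Claim_equal_filter_google := by
  intro text _
  show filter_google text = filter_google_alt text
  simp only [filter_google, filter_google_alt, pv_split_eq]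
  rw [pv_step ['s','e','a','r','c','h'] (by decide),
      pv_step ['r','e','s','e','a','r','c','h'] (by decide),
      pv_step ['f','i','n','d'] (by decide)]
  simp [pvScanC]
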